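-- pv_equiv track=rewrite | github.com/szmisztal/codewars | 7kyu/password_maker.py | make_password
-- ===== SOURCE A (Python) =====
-- def make_password(phrase):
--     d = {"i": "1", "o": "0", "s": "5"}
--     result = ""
--     for i in phrase.split(" "):
--         if i[0].lower() in d.keys():
--             result += d[i[0].lower()]
--         else:
--             result += i[0]
--     return result
-- ===== SOURCE B (Python) =====
-- def make_password(phrase):
--     sub = {'i': '1', 'o': '0', 's': '5', 'I': '1', 'O': '0', 'S': '5'}
--     out = []
--     take = True
--     for c in phrase:
--         if take and c != ' ':
--             out.append(sub.get(c, c))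
--         take = c == ' '
--     return ''.join(out)
-- ===== Notes on version B (the rewrite author's own statement) =====
-- stated objective: alternative
-- what changed: A splits the phrase into words and loops over words, lowercasing each word's first character for a dict membership test plus lookup; B never splits: it makes one character-level pass with a boolean word-start state machine, emitting the substituted character (table with both cases, no lowercasing) exactly when the previous character was a space boundary.
import Mathlib
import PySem

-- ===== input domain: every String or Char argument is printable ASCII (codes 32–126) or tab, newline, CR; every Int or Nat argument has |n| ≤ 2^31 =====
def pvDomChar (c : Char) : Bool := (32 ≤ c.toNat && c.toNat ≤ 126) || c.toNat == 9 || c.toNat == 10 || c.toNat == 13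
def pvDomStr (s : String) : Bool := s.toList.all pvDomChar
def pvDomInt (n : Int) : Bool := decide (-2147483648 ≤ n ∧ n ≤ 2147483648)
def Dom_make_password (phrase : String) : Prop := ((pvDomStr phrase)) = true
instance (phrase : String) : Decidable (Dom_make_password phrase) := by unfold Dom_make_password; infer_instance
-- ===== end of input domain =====

-- B replaces A's split-into-words loop (lowercase first letter, dict membership + lookup)
-- with a single character-level pass driven by a word-start state machine and a
-- both-cases substitution table; no split, no lowercasing.

-- ===== PORT A =====
-- the dict literal d = {"i": "1", "o": "0", "s": "5"}
def mpD : PySem.Dict String String := ⟨[("i", "1"), ("o", "0"), ("s", "5")]⟩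

-- one iteration of A's for-loop: membership test in d.keys() + lookup, fused into get?
def mpStep (result : List Char) (w : List Char) : List Char :=
  match PySem.List.pyGet? w 0 with
  | none => result   -- IndexError in Python; such inputs are excluded by Pre_
  | some c =>
    match PySem.Dict.get? mpD (String.ofList [PySem.Chars.lowerChar c]) with
    | some v => result ++ v.toList
    | none => result ++ [c]

def make_password (phrase : String) : String :=
  String.ofList ((PySem.Chars.splitOn phrase.toList [' ']).foldl mpStep [])

-- ===== PORT B =====
-- the dict literal sub = {'i':'1','o':'0','s':'5','I':'1','O':'0','S':'5'}
def mpSubD : PySem.Dict Char Char :=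
  ⟨[('i', '1'), ('o', '0'), ('s', '5'), ('I', '1'), ('O', '0'), ('S', '5')]⟩

-- one iteration of B's for-loop over characters: state = (take, out)
def mpScanStep (st : Bool × List Char) (c : Char) : Bool × List Char :=
  (c == ' ',
   if st.1 && !(c == ' ') then st.2 ++ [PySem.Dict.getD mpSubD c c] else st.2)

def make_password_alt (phrase : String) : String :=
  String.ofList ((phrase.toList.foldl mpScanStep (true, [])).2)

-- ===== PRECONDITION & SPEC =====
-- Pre_ excludes exactly the inputs where Python A raises IndexError: a split on a single
-- space yielding an empty word (empty phrase, leading/trailing or doubled spaces).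
def Pre_make_password (phrase : String) : Prop :=
  ∀ w ∈ PySem.Chars.splitOn phrase.toList [' '], w ≠ []
instance (phrase : String) : Decidable (Pre_make_password phrase) := by
  unfold Pre_make_password; infer_instance

def pvWitness_make_password : String := "is Our Secret old"

def Spec_make_password (phrase : String) (out : String) : Prop := out = make_password_alt phrase
instance (phrase : String) (out : String) : Decidable (Spec_make_password phrase out) := by unfold Spec_make_password; infer_instance

-- ===== CLAIM (what is proved, stated in full; the proofs are below) =====
def Claim_equal_make_password : Prop := ∀ (phrase : String), Dom_make_password phrase → Pre_make_password phrase → Spec_make_password phrase (make_password phrase)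

-- ===== LEMMAS AND PROOFS =====

-- proof-only: the common per-character substitution table
def mpTable (c : Char) : Char :=
  if c = 'i' then '1' else if c = 'o' then '0' else if c = 's' then '5'
  else if c = 'I' then '1' else if c = 'O' then '0' else if c = 'S' then '5' else c

-- proof-only: structural recursion equivalent to splitOn · [' ']
def spl : List Char → List (List Char)
  | [] => [[]]
  | c :: rest =>
    if c = ' ' then [] :: spl rest
    else
      match spl rest with
      | w :: ws => (c :: w) :: ws
      | [] => [[c]]

-- proof-only: structural recursion equivalent to B's scan
def firsts : Bool → List Char → List Char
  | _, [] => []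
  | take, c :: cs =>
    (if take && !(c == ' ') then [mpTable c] else []) ++ firsts (c == ' ') cs

def mpGlue (pre : List Char) : List (List Char) → List (List Char)
  | [] => [pre]
  | w :: ws => (pre ++ w) :: ws

lemma spl_ne_nil (l : List Char) : spl l ≠ [] := by
  cases l with
  | nil => simp [spl]
  | cons c rest =>
    simp only [spl]
    split
    · simp
    · split <;> simp

lemma splitOn_go_eq (fuel : Nat) (l cur : List Char) (acc : List (List Char))
    (h : l.length ≤ fuel) :
    PySem.Chars.splitOn.go [' '] fuel l cur acc =
      acc.reverse ++ mpGlue cur.reverse (spl l) := by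
  induction fuel generalizing l cur acc with
  | zero =>
    have : l = [] := List.length_eq_zero_iff.1 (Nat.le_zero.1 h)
    subst this
    simp [PySem.Chars.splitOn.go, spl, mpGlue]
  | succ fuel ih =>
    cases l with
    | nil => simp [PySem.Chars.splitOn.go, spl, mpGlue]
    | cons c rest =>
      by_cases hc : c = ' '
      · subst hc
        have hpre : ([' '] : List Char).isPrefixOf (' ' :: rest) = true := by
          simp [List.isPrefixOf]
        rw [PySem.Chars.splitOn.go]
        simp only [hpre, if_true, List.length_cons, List.drop_succ_cons, List.length_nil, List.drop_zero]
        rw [ih rest [] (cur.reverse :: acc) (by simpa using Nat.le_of_succ_le_succ h)]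
        cases hs : spl rest with
        | nil => exact absurd hs (spl_ne_nil rest)
        | cons w ws =>
          simp [spl, hs, mpGlue]
      · have hpre : ([' '] : List Char).isPrefixOf (c :: rest) = false := by
          simp only [List.isPrefixOf, Bool.and_true, beq_eq_false_iff_ne]
          exact fun hcon => hc hcon.symm
        rw [PySem.Chars.splitOn.go]
        simp only [hpre, Bool.false_eq_true, if_false]
        rw [ih rest (c :: cur) acc (by simpa using Nat.le_of_succ_le_succ h)]
        cases hs : spl rest with
        | nil => exact absurd hs (spl_ne_nil rest)
        | cons w ws =>
          simp [spl, hs, hc, mpGlue]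

lemma splitOn_eq_spl (l : List Char) : PySem.Chars.splitOn l [' '] = spl l := by
  rw [PySem.Chars.splitOn, splitOn_go_eq (l.length + 1) l [] [] (by omega)]
  cases hs : spl l with
  | nil => exact absurd hs (spl_ne_nil l)
  | cons w ws => simp [mpGlue]

lemma mpD_get?_mk (x : Char) :
    PySem.Dict.get? mpD (String.ofList [x]) =
      if x = 'i' then some "1" else if x = 'o' then some "0"
      else if x = 's' then some "5" else none := by
  have hi : (String.ofList [x] = "i") ↔ (x = 'i') := by
    constructor
    · intro h; simpa [String.ext_iff] using h
    · rintro rfl; rfl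
  have ho : (String.ofList [x] = "o") ↔ (x = 'o') := by
    constructor
    · intro h; simpa [String.ext_iff] using h
    · rintro rfl; rfl
  have hs : (String.ofList [x] = "s") ↔ (x = 's') := by
    constructor
    · intro h; simpa [String.ext_iff] using h
    · rintro rfl; rfl
  have e1 : ("i" == String.ofList [x]) = (x == 'i') := by
    by_cases h : x = 'i'
    · subst h; decide
    · have hne : ¬ ("i" = String.ofList [x]) := fun hcon => h (hi.1 hcon.symm)
      simp [hne, h]
  have e2 : ("o" == String.ofList [x]) = (x == 'o') := by
    by_cases h : x = 'o'
    · subst h; decide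
    · have hne : ¬ ("o" = String.ofList [x]) := fun hcon => h (ho.1 hcon.symm)
      simp [hne, h]
  have e3 : ("s" == String.ofList [x]) = (x == 's') := by
    by_cases h : x = 's'
    · subst h; decide
    · have hne : ¬ ("s" = String.ofList [x]) := fun hcon => h (hs.1 hcon.symm)
      simp [hne, h]
  simp only [PySem.Dict.get?, mpD, List.find?, e1, e2, e3]
  by_cases h1 : x = 'i'
  · subst h1; decide
  by_cases h2 : x = 'o'
  · subst h2; decide
  by_cases h3 : x = 's'
  · subst h3; decide
  have f1 : (x == 'i') = false := beq_eq_false_iff_ne.2 h1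
  have f2 : (x == 'o') = false := beq_eq_false_iff_ne.2 h2
  have f3 : (x == 's') = false := beq_eq_false_iff_ne.2 h3
  rw [f1, f2, f3]
  simp [h1, h2, h3]

-- A's per-character substitution (lowercase, then lookup in d) equals the table
lemma sub1 (c : Char) :
    (match PySem.Dict.get? mpD (String.ofList [PySem.Chars.lowerChar c]) with
     | some v => v.toList
     | none => [c]) = [mpTable c] := by
  by_cases hu : PySem.Chars.isupper c = true
  · by_cases hI : c = 'I'; · subst hI; decide
    by_cases hO : c = 'O'; · subst hO; decide
    by_cases hS : c = 'S'; · subst hS; decide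
    have hu0 : PySem.Chars.isupper c = true := hu
    simp only [PySem.Chars.isupper, Bool.and_eq_true, decide_eq_true_eq, Char.le_def] at hu
    have hb1 : 65 ≤ c.toNat := hu.1
    have hb2 : c.toNat ≤ 90 := hu.2
    have hl : PySem.Chars.lowerChar c = Char.ofNat (c.toNat + 32) := by
      simp [PySem.Chars.lowerChar, hu0]
    have hval : (Char.ofNat (c.toNat + 32)).toNat = c.toNat + 32 := by
      rw [Char.toNat_ofNat]
      have : (c.toNat + 32).isValidChar := Or.inl (by omega)
      simp [this]
    have hback : ∀ n : Nat, c.toNat = n → c = Char.ofNat n := by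
      intro n hn; rw [← hn, Char.ofNat_toNat]
    have hlit : ('i').toNat = 105 ∧ ('o').toNat = 111 ∧ ('s').toNat = 115 := by decide
    have d1 : Char.ofNat (c.toNat + 32) ≠ 'i' := by
      intro h
      have h2 := congrArg Char.toNat h
      rw [hval] at h2
      exact hI ((hback 73 (by omega)).trans (by decide))
    have d2 : Char.ofNat (c.toNat + 32) ≠ 'o' := by
      intro h
      have h2 := congrArg Char.toNat h
      rw [hval] at h2
      exact hO ((hback 79 (by omega)).trans (by decide))
    have d3 : Char.ofNat (c.toNat + 32) ≠ 's' := by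
      intro h
      have h2 := congrArg Char.toNat h
      rw [hval] at h2
      exact hS ((hback 83 (by omega)).trans (by decide))
    have t1 : c ≠ 'i' := by intro h; rw [h] at hb2; exact absurd hb2 (by decide)
    have t2 : c ≠ 'o' := by intro h; rw [h] at hb2; exact absurd hb2 (by decide)
    have t3 : c ≠ 's' := by intro h; rw [h] at hb2; exact absurd hb2 (by decide)
    rw [hl, mpD_get?_mk]
    simp [d1, d2, d3, mpTable, t1, t2, t3, hI, hO, hS]
  · have hl : PySem.Chars.lowerChar c = c := by
      simp [PySem.Chars.lowerChar, hu]
    have hni : c ≠ 'I' := by rintro rfl; exact hu (by decide)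
    have hno : c ≠ 'O' := by rintro rfl; exact hu (by decide)
    have hns : c ≠ 'S' := by rintro rfl; exact hu (by decide)
    rw [hl, mpD_get?_mk]
    by_cases h1 : c = 'i' <;> by_cases h2 : c = 'o' <;> by_cases h3 : c = 's' <;>
      simp_all [mpTable]

lemma sub_eq_table (c : Char) (acc : List Char) :
    (match PySem.Dict.get? mpD (String.ofList [PySem.Chars.lowerChar c]) with
     | some v => acc ++ v.toList
     | none => acc ++ [c]) = acc ++ [mpTable c] := by
  have h := sub1 c
  cases hm : PySem.Dict.get? mpD (String.ofList [PySem.Chars.lowerChar c]) with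
  | some v => rw [hm] at h; simp only [] at h ⊢; rw [h]
  | none => rw [hm] at h; simp only [] at h ⊢; rw [h]

-- B's per-character substitution (sub.get(c, c)) equals the table
lemma subB_eq (c : Char) : PySem.Dict.getD mpSubD c c = mpTable c := by
  by_cases h1 : c = 'i'; · subst h1; decide
  by_cases h2 : c = 'o'; · subst h2; decide
  by_cases h3 : c = 's'; · subst h3; decide
  by_cases h4 : c = 'I'; · subst h4; decide
  by_cases h5 : c = 'O'; · subst h5; decide
  by_cases h6 : c = 'S'; · subst h6; decide
  have g1 : ('i' == c) = false := beq_eq_false_iff_ne.2 (Ne.symm h1)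
  have g2 : ('o' == c) = false := beq_eq_false_iff_ne.2 (Ne.symm h2)
  have g3 : ('s' == c) = false := beq_eq_false_iff_ne.2 (Ne.symm h3)
  have g4 : ('I' == c) = false := beq_eq_false_iff_ne.2 (Ne.symm h4)
  have g5 : ('O' == c) = false := beq_eq_false_iff_ne.2 (Ne.symm h5)
  have g6 : ('S' == c) = false := beq_eq_false_iff_ne.2 (Ne.symm h6)
  simp [PySem.Dict.getD, PySem.Dict.get?, mpSubD, List.find?,
    g1, g2, g3, g4, g5, g6, mpTable, h1, h2, h3, h4, h5, h6]

-- A's fold over a list of nonempty words = the word heads through the table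
lemma foldl_mpStep (ws : List (List Char)) (h : ∀ w ∈ ws, w ≠ []) (acc : List Char) :
    ws.foldl mpStep acc = acc ++ ws.map (fun w => mpTable (w.headD ' ')) := by
  induction ws generalizing acc with
  | nil => simp
  | cons w ws ih =>
    have hw : w ≠ [] := h w (by simp)
    obtain ⟨c, cs, rfl⟩ : ∃ c cs, w = c :: cs := by
      cases w with
      | nil => exact absurd rfl hw
      | cons c cs => exact ⟨c, cs, rfl⟩
    have hg : PySem.List.pyGet? (c :: cs) (0 : Int) = some c :=
      PySem.List.pyGet?_zero_cons c cs
    simp only [List.foldl_cons, List.map_cons, List.headD_cons]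
    rw [ih (fun w hmem => h w (by simp [hmem]))]
    simp only [mpStep, hg]
    rw [sub_eq_table c acc]
    simp

-- B's fold = the firsts recursion
lemma foldl_mpScanStep (l : List Char) (take : Bool) (acc : List Char) :
    (l.foldl mpScanStep (take, acc)).2 = acc ++ firsts take l := by
  induction l generalizing take acc with
  | nil => simp [firsts]
  | cons c cs ih =>
    simp only [List.foldl_cons, mpScanStep, firsts]
    rw [ih]
    split <;> simp [subB_eq]

-- the firsts recursion collects exactly the table-substituted word heads
lemma firsts_spec (l : List Char) :
    ∀ w ws, spl l = w :: ws → (∀ u ∈ ws, u ≠ []) →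
      firsts false l = ws.map (fun u => mpTable (u.headD ' ')) ∧
      (w ≠ [] → firsts true l = (w :: ws).map (fun u => mpTable (u.headD ' '))) := by
  induction l with
  | nil =>
    intro w ws hspl hne
    simp only [spl] at hspl
    obtain ⟨rfl, rfl⟩ : w = ([] : List Char) ∧ ws = [] := by
      cases hspl; exact ⟨rfl, rfl⟩
    exact ⟨by simp [firsts], fun hw => absurd rfl hw⟩
  | cons c cs ih =>
    intro w ws hspl hne
    by_cases hc : c = ' '
    · subst hc
      simp only [spl, if_true] at hspl
      cases hs : spl cs with
      | nil => exact absurd hs (spl_ne_nil cs)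
      | cons w' ws' =>
        rw [hs] at hspl
        obtain ⟨rfl, rfl⟩ : w = ([] : List Char) ∧ ws = w' :: ws' := by
          cases hspl; exact ⟨rfl, rfl⟩
        have hw' : w' ≠ [] := hne w' (by simp)
        have hws' : ∀ u ∈ ws', u ≠ [] := fun u hu => hne u (by simp [hu])
        have h2 := (ih w' ws' hs hws').2 hw'
        refine ⟨?_, fun hw => absurd rfl hw⟩
        simp [firsts, h2]
    · simp only [spl, if_neg hc] at hspl
      cases hs : spl cs with
      | nil => exact absurd hs (spl_ne_nil cs)
      | cons w' ws' =>
        rw [hs] at hspl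
        obtain ⟨rfl, rfl⟩ : w = c :: w' ∧ ws = ws' := by
          cases hspl; exact ⟨rfl, rfl⟩
        have h1 := (ih w' ws hs hne).1
        have hcne : (c == ' ') = false := beq_eq_false_iff_ne.2 hc
        constructor
        · simp [firsts, hcne, h1]
        · intro _
          simp [firsts, hcne, h1]

-- ===== VERDICT (by name: the statement is the Claim_ definition above) =====
theorem make_password_spec : Claim_equal_make_password := by
  intro phrase _ hpre
  unfold Spec_make_password make_password make_password_alt
  unfold Pre_make_password at hpre
  rw [splitOn_eq_spl] at hpre ⊢
  rw [foldl_mpScanStep phrase.toList true []]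
  cases hs : spl phrase.toList with
  | nil => exact absurd hs (spl_ne_nil phrase.toList)
  | cons w ws =>
    rw [hs] at hpre
    have hw : w ≠ [] := hpre w (by simp)
    have hws : ∀ u ∈ ws, u ≠ [] := fun u hu => hpre u (by simp [hu])
    rw [foldl_mpStep (w :: ws) hpre []]
    rw [(firsts_spec phrase.toList w ws hs hws).2 hw]
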